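-- pv_equiv track=rewrite | github.com/NavyDevilDoc/Local_LLM_w_Streamlit | TextPreprocessor.py | _indent_wrapped_text
-- ===== SOURCE A (Python) =====
-- def _indent_wrapped_text(text: str, prefix: str, line_length: int) -> str:
--     """Indent wrapped text with proper alignment."""
--     lines = text.split('\n')
--     if not lines:
--         return ""
--
--     # First line gets the prefix
--     result = [prefix + lines[0]]
--     # Subsequent lines get space alignment
--     indent = ' ' * len(prefix)
--     result.extend(indent + line for line in lines[1:])
--
--     return '\n'.join(result)
-- ===== SOURCE B (Python) =====
-- def _indent_wrapped_text(text: str, prefix: str, line_length: int) -> str: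
--     """Indent wrapped text with proper alignment."""
--     indent = ' ' * len(prefix)
--     return prefix + text.replace('\n', '\n' + indent)
-- ===== Notes on version B (the rewrite author's own statement) =====
-- stated objective: idiomatic
-- what changed: B drops the split-into-list / prefix-head / map-tail / join pipeline and instead does one string substitution: prepend the prefix and replace every '\n' with '\n' plus the alignment indent.
import Mathlib
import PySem

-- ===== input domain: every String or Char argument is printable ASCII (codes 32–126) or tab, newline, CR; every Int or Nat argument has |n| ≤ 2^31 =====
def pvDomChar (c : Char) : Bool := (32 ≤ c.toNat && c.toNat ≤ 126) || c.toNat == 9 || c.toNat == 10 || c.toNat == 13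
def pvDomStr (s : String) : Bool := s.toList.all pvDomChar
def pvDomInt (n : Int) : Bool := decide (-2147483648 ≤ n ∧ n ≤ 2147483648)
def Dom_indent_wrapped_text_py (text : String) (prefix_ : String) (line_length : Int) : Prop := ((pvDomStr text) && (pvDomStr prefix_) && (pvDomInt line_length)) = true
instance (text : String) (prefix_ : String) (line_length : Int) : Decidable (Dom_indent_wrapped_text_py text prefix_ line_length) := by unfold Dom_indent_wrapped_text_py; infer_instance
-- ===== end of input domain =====

-- B replaces A's split/prefix-head/map-tail/join pipeline with a single newline substitution (idiomatic; return value only, no mutation involved).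

-- ===== PORT A =====
-- split('\n'), prefix the first line, indent the rest, '\n'.join.
def indent_wrapped_text_py (text : String) (prefix_ : String) (line_length : Int) : String :=
  match PySem.Chars.splitOn text.toList ['\n'] with
  | [] => ""
  | l0 :: rest =>
      let indent := PySem.List.pyRepeat [' '] (PySem.Str.len prefix_)
      String.mk (PySem.Chars.join ['\n'] ((prefix_.toList ++ l0) :: rest.map (fun line => indent ++ line)))

-- ===== PORT B =====
-- prefix + text.replace('\n', '\n' + indent)
def indent_wrapped_text_py_alt (text : String) (prefix_ : String) (line_length : Int) : String :=
  let indent := PySem.List.pyRepeat [' '] (PySem.Str.len prefix_)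
  String.mk (prefix_.toList ++ PySem.Chars.replace text.toList ['\n'] ('\n' :: indent))

-- ===== PRECONDITION & SPEC =====
def Spec_indent_wrapped_text_py (text : String) (prefix_ : String) (line_length : Int) (out : String) : Prop := out = indent_wrapped_text_py_alt text prefix_ line_length
instance (text : String) (prefix_ : String) (line_length : Int) (out : String) : Decidable (Spec_indent_wrapped_text_py text prefix_ line_length out) := by unfold Spec_indent_wrapped_text_py; infer_instance

-- ===== CLAIM (what is proved, stated in full; the proofs are below) =====
def Claim_equal_indent_wrapped_text_py : Prop := ∀ (text : String) (prefix_ : String) (line_length : Int), Dom_indent_wrapped_text_py text prefix_ line_length → Spec_indent_wrapped_text_py text prefix_ line_length (indent_wrapped_text_py text prefix_ line_length)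

-- ===== LEMMAS AND PROOFS =====

-- structural characterisation of text.split('\n')
def pvSplitNl : List Char → List (List Char)
  | [] => [[]]
  | c :: t =>
      if c = '\n' then [] :: pvSplitNl t
      else
        match pvSplitNl t with
        | [] => [[c]]
        | h :: r => (c :: h) :: r

theorem pvSplitNl_ne_nil (s : List Char) : pvSplitNl s ≠ [] := by
  cases s with
  | nil => simp [pvSplitNl]
  | cons c t =>
      simp only [pvSplitNl]
      split_ifs
      · simp
      · cases h : pvSplitNl t <;> simp

theorem pvSplitOn_go_eq (fuel : Nat) : ∀ (s cur : List Char) (acc : List (List Char)),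
    s.length ≤ fuel →
    PySem.Chars.splitOn.go ['\n'] fuel s cur acc =
      acc.reverse ++ (match pvSplitNl s with
        | [] => []
        | h :: r => (cur.reverse ++ h) :: r) := by
  induction fuel with
  | zero =>
      intro s cur acc hlen
      have hs : s = [] := List.length_eq_zero_iff.mp (Nat.le_zero.mp hlen)
      subst hs
      simp [PySem.Chars.splitOn.go, pvSplitNl]
  | succ fuel ih =>
      intro s cur acc hlen
      cases s with
      | nil => simp [PySem.Chars.splitOn.go, pvSplitNl]
      | cons c t =>
          have hlen' : t.length ≤ fuel := by simpa using Nat.le_of_succ_le_succ hlen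
          by_cases hc : c = '\n'
          · subst hc
            have hstep : PySem.Chars.splitOn.go ['\n'] (fuel + 1) ('\n' :: t) cur acc
                = PySem.Chars.splitOn.go ['\n'] fuel t [] (cur.reverse :: acc) := by
              simp [PySem.Chars.splitOn.go, List.isPrefixOf]
            rw [hstep, ih t [] (cur.reverse :: acc) hlen']
            have hne := pvSplitNl_ne_nil t
            cases h : pvSplitNl t with
            | nil => exact absurd h hne
            | cons h' r' => simp [pvSplitNl, h]
          · have hstep : PySem.Chars.splitOn.go ['\n'] (fuel + 1) (c :: t) cur acc
                = PySem.Chars.splitOn.go ['\n'] fuel t (c :: cur) acc := by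
              simp [PySem.Chars.splitOn.go, List.isPrefixOf, hc]
              exact fun h => absurd h.symm hc
            rw [hstep, ih t (c :: cur) acc hlen']
            have hne := pvSplitNl_ne_nil t
            cases h : pvSplitNl t with
            | nil => exact absurd h hne
            | cons h' r' => simp [pvSplitNl, hc, h]

theorem pvSplitOn_nl (s : List Char) : PySem.Chars.splitOn s ['\n'] = pvSplitNl s := by
  unfold PySem.Chars.splitOn
  rw [pvSplitOn_go_eq (s.length + 1) s [] [] (Nat.le_succ _)]
  have hne := pvSplitNl_ne_nil s
  cases h : pvSplitNl s with
  | nil => exact absurd h hne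
  | cons h' r' => simp

theorem pvReplace_go_eq (new : List Char) (fuel : Nat) : ∀ (s acc : List Char),
    s.length ≤ fuel →
    PySem.Chars.replace.go ['\n'] new fuel s acc =
      acc.reverse ++ s.flatMap (fun c => if c = '\n' then new else [c]) := by
  induction fuel with
  | zero =>
      intro s acc hlen
      have hs : s = [] := List.length_eq_zero_iff.mp (Nat.le_zero.mp hlen)
      subst hs
      simp [PySem.Chars.replace.go]
  | succ fuel ih =>
      intro s acc hlen
      cases s with
      | nil => simp [PySem.Chars.replace.go]
      | cons c t =>
          have hlen' : t.length ≤ fuel := by simpa using Nat.le_of_succ_le_succ hlen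
          by_cases hc : c = '\n'
          · subst hc
            have hstep : PySem.Chars.replace.go ['\n'] new (fuel + 1) ('\n' :: t) acc
                = PySem.Chars.replace.go ['\n'] new fuel t (new.reverse ++ acc) := by
              simp [PySem.Chars.replace.go, List.isPrefixOf]
            rw [hstep, ih t (new.reverse ++ acc) hlen']
            simp
          · have hstep : PySem.Chars.replace.go ['\n'] new (fuel + 1) (c :: t) acc
                = PySem.Chars.replace.go ['\n'] new fuel t (c :: acc) := by
              simp [PySem.Chars.replace.go, List.isPrefixOf, hc]
              exact fun h => absurd h.symm hc
            rw [hstep, ih t (c :: acc) hlen']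
            simp [hc]

theorem pvReplace_nl (s new : List Char) :
    PySem.Chars.replace s ['\n'] new = s.flatMap (fun c => if c = '\n' then new else [c]) := by
  unfold PySem.Chars.replace
  rw [if_neg (by simp)]
  simpa using pvReplace_go_eq new s.length s [] (Nat.le_refl _)

theorem pvMain (ind : List Char) : ∀ (s p h : List Char) (r : List (List Char)),
    pvSplitNl s = h :: r →
    PySem.Chars.join ['\n'] ((p ++ h) :: r.map (fun line => ind ++ line)) =
      p ++ s.flatMap (fun c => if c = '\n' then '\n' :: ind else [c]) := by
  intro s
  induction s with
  | nil =>
      intro p h r hsplit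
      simp only [pvSplitNl] at hsplit
      obtain ⟨rfl, rfl⟩ : h = [] ∧ r = [] := by
        injection hsplit with h1 h2; exact ⟨h1.symm, h2.symm⟩
      simp [PySem.Chars.join_singleton]
  | cons c t ih =>
      intro p h r hsplit
      by_cases hc : c = '\n'
      · subst hc
        simp only [pvSplitNl, if_pos rfl] at hsplit
        obtain ⟨rfl, hr⟩ : h = [] ∧ pvSplitNl t = r := by
          injection hsplit with h1 h2; exact ⟨h1.symm, h2⟩
        cases r with
        | nil => exact absurd hr (pvSplitNl_ne_nil t)
        | cons h' r' =>
            simp only [List.map_cons]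
            rw [PySem.Chars.join_cons_cons]
            rw [ih ind h' r' hr]
            simp
      · simp only [pvSplitNl, if_neg hc] at hsplit
        have hne := pvSplitNl_ne_nil t
        cases ht : pvSplitNl t with
        | nil => exact absurd ht hne
        | cons h' r' =>
            rw [ht] at hsplit
            obtain ⟨rfl, hr2⟩ : h = c :: h' ∧ r' = r := by
              injection hsplit with h1 h2; exact ⟨h1.symm, h2⟩
            subst hr2
            have := ih (p ++ [c]) h' r' ht
            simp only [List.append_assoc, List.singleton_append] at this
            rw [this]
            simp [hc]

-- ===== VERDICT (by name: the statement is the Claim_ definition above) =====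
theorem indent_wrapped_text_py_spec : Claim_equal_indent_wrapped_text_py := by
  intro text prefix_ line_length _
  unfold Spec_indent_wrapped_text_py indent_wrapped_text_py indent_wrapped_text_py_alt
  rw [pvSplitOn_nl]
  have hne := pvSplitNl_ne_nil text.toList
  cases h : pvSplitNl text.toList with
  | nil => exact absurd h hne
  | cons l0 rest =>
      simp only
      rw [pvReplace_nl]
      rw [pvMain (PySem.List.pyRepeat [' '] (PySem.Str.len prefix_)) text.toList prefix_.toList l0 rest h]
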